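-- pv_equiv track=rewrite | github.com/MaxenceGueyffier/evolucell | evolucell/quadtree.py | contain_approximatively
-- ===== SOURCE A (Python) =====
-- def contain_approximatively(nptup,nparray):
--     """check if the particule or a slightly different is already in the quadtree"""
--     _set = set((x,y) for [x,y] in nparray)
--     (x,y) = nptup
--     for i in range(-1,2):
--         for j in range(-1,2):
--             if (x+i,y+j) in _set :
--                 return True
--     return False
-- ===== SOURCE B (Python) =====
-- def contain_approximatively(nptup, nparray):
--     """check if the particule or a slightly different is already in the quadtree"""
--     (x, y) = nptup
--     for [px, py] in nparray:
--         if abs(px - x) <= 1 and abs(py - y) <= 1: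
--             return True
--     return False
-- ===== Notes on version B (the rewrite author's own statement) =====
-- stated objective: simpler
-- what changed: B replaces A's set of all array points probed with 9 neighbor keys by a single early-exit scan testing Chebyshev distance |px-x|<=1 and |py-y|<=1 arithmetically, with no set at all.
-- outside the precondition, e.g. on contain_approximatively((0, 0), [[1, 2, 3]]): A raises ValueError, B raises ValueError
import Mathlib
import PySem

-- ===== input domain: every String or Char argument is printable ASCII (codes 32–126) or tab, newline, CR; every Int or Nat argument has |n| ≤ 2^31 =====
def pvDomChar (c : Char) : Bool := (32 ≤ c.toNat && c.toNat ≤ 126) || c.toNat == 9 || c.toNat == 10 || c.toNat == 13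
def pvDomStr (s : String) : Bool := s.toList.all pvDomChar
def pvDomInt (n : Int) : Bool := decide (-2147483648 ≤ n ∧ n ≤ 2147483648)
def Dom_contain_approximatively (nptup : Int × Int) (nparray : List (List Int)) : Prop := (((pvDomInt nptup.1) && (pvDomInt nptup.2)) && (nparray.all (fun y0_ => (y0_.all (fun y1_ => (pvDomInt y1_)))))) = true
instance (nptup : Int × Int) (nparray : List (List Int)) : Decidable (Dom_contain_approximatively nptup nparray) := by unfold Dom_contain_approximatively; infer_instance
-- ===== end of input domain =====

-- B drops A's point-set entirely: a single early-exit scan testing Chebyshev distance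
-- |px-x| <= 1 and |py-y| <= 1 arithmetically (exactly the 9-neighborhood over ints);
-- objective: simpler. Neither version mutates its arguments.

-- unpack '[px, py] = row' for a row of length 2 (exact under Pre_; total form for Lean)
def pvUnpack2 (r : List Int) : Int × Int := (r.getD 0 0, r.getD 1 0)

-- ===== PORT A =====
def contain_approximatively (nptup : Int × Int) (nparray : List (List Int)) : Bool :=
  let _set : PySem.Set (Int × Int) := PySem.Set.ofList (nparray.map pvUnpack2)
  let x := nptup.1
  let y := nptup.2
  (PySem.List.pyRange (-1) 2 1).any (fun i =>
    (PySem.List.pyRange (-1) 2 1).any (fun j =>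
      PySem.Set.contains _set (x + i, y + j)))

-- ===== PORT B =====
def contain_approximatively_alt (nptup : Int × Int) (nparray : List (List Int)) : Bool :=
  match nparray with
  | [] => false
  | r :: rest =>
      if ((pvUnpack2 r).1 - nptup.1).natAbs ≤ 1 then
        if ((pvUnpack2 r).2 - nptup.2).natAbs ≤ 1 then true
        else contain_approximatively_alt nptup rest
      else contain_approximatively_alt nptup rest

-- ===== PRECONDITION & SPEC =====
-- Pre_ excludes arrays with a row whose length is not 2: Python A (and B) raise ValueError
-- there while unpacking '[x, y]'.
def Pre_contain_approximatively (nptup : Int × Int) (nparray : List (List Int)) : Prop :=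
  ∀ r ∈ nparray, r.length = 2
instance (nptup : Int × Int) (nparray : List (List Int)) : Decidable (Pre_contain_approximatively nptup nparray) := by unfold Pre_contain_approximatively; infer_instance

def pvWitness_contain_approximatively : (Int × Int) × List (List Int) :=
  ((3, 4), [[1, 2], [3, 5], [10, 10]])

def Spec_contain_approximatively (nptup : Int × Int) (nparray : List (List Int)) (out : Bool) : Prop := out = contain_approximatively_alt nptup nparray
instance (nptup : Int × Int) (nparray : List (List Int)) (out : Bool) : Decidable (Spec_contain_approximatively nptup nparray out) := by unfold Spec_contain_approximatively; infer_instance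

-- ===== CLAIM (what is proved, stated in full; the proofs are below) =====
def Claim_equal_contain_approximatively : Prop := ∀ (nptup : Int × Int) (nparray : List (List Int)), Dom_contain_approximatively nptup nparray → Pre_contain_approximatively nptup nparray → Spec_contain_approximatively nptup nparray (contain_approximatively nptup nparray)

-- ===== LEMMAS AND PROOFS =====
theorem pvRange_lit : PySem.List.pyRange (-1) 2 1 = [-1, 0, 1] := by decide

-- A is True iff some row's point lies in the 3×3 neighborhood of nptup.
theorem pvA_iff (nptup : Int × Int) (nparray : List (List Int)) :
    contain_approximatively nptup nparray = true ↔
      ∃ r ∈ nparray, ∃ i ∈ ([-1, 0, 1] : List Int), ∃ j ∈ ([-1, 0, 1] : List Int),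
        pvUnpack2 r = (nptup.1 + i, nptup.2 + j) := by
  simp only [contain_approximatively, pvRange_lit, List.any_eq_true,
    PySem.Set.contains_iff, PySem.Set.mem_ofList, List.mem_map]
  constructor
  · rintro ⟨i, hi, j, hj, r, hr, hval⟩
    exact ⟨r, hr, i, hi, j, hj, hval⟩
  · rintro ⟨r, hr, i, hi, j, hj, hval⟩
    exact ⟨i, hi, j, hj, r, hr, hval⟩

-- B is True iff some row's point is within Chebyshev distance 1.
theorem pvB_iff (nptup : Int × Int) (nparray : List (List Int)) :
    contain_approximatively_alt nptup nparray = true ↔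
      ∃ r ∈ nparray, ((pvUnpack2 r).1 - nptup.1).natAbs ≤ 1 ∧
        ((pvUnpack2 r).2 - nptup.2).natAbs ≤ 1 := by
  induction nparray with
  | nil => simp [contain_approximatively_alt]
  | cons r rest ih =>
    simp only [contain_approximatively_alt]
    by_cases h1 : ((pvUnpack2 r).1 - nptup.1).natAbs ≤ 1 <;>
      by_cases h2 : ((pvUnpack2 r).2 - nptup.2).natAbs ≤ 1 <;>
      simp [h1, h2, ih]

-- The two characterisations coincide pointwise.
theorem pvNbhd_iff (p q : Int × Int) :
    (∃ i ∈ ([-1, 0, 1] : List Int), ∃ j ∈ ([-1, 0, 1] : List Int),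
        p = (q.1 + i, q.2 + j)) ↔
      (p.1 - q.1).natAbs ≤ 1 ∧ (p.2 - q.2).natAbs ≤ 1 := by
  constructor
  · rintro ⟨i, hi, j, hj, hval⟩
    obtain ⟨p1, p2⟩ := p
    simp only [Prod.mk.injEq] at hval
    obtain ⟨h1, h2⟩ := hval
    fin_cases hi <;> fin_cases hj <;> subst h1 <;> subst h2 <;> simp
  · rintro ⟨h1, h2⟩
    refine ⟨p.1 - q.1, ?_, p.2 - q.2, ?_, ?_⟩
    · simp only [List.mem_cons]; omega
    · simp only [List.mem_cons]; omega
    · obtain ⟨p1, p2⟩ := p; simp only [Prod.mk.injEq]; constructor <;> ring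

-- ===== VERDICT (by name: the statement is the Claim_ definition above) =====
theorem contain_approximatively_spec : Claim_equal_contain_approximatively := by
  intro nptup nparray _hDom _hPre
  unfold Spec_contain_approximatively
  have h : contain_approximatively nptup nparray = true ↔
      contain_approximatively_alt nptup nparray = true := by
    rw [pvA_iff, pvB_iff]
    exact exists_congr fun r => and_congr_right fun _ => pvNbhd_iff (pvUnpack2 r) nptup
  cases hA : contain_approximatively nptup nparray with
  | true => exact (h.mp hA).symm
  | false =>
    cases hB : contain_approximatively_alt nptup nparray with
    | true => exact absurd (h.mpr hB) (by simp [hA])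
    | false => rfl
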